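-- pv_equiv track=rewrite | github.com/ecodan/gavel-ai | .cicadas-skill/cicadas/scripts/scan_repo.py | _is_gitignored_path
-- ===== SOURCE A (Python) =====
-- def _is_gitignored_path(rel_path: str, gitignored_paths: set[str]) -> bool:
--     normalized = rel_path.strip("/")
--     if not normalized:
--         return False
--     parts = normalized.split("/")
--     for idx in range(len(parts), 0, -1):
--         candidate = "/".join(parts[:idx])
--         if candidate in gitignored_paths:
--             return True
--     return False
-- ===== SOURCE B (Python) =====
-- def _is_gitignored_path(rel_path: str, gitignored_paths: set[str]) -> bool:
--     # Build every ancestor-prefix candidate in ONE forward pass, then decide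
--     # with a single set-disjointness test (instead of A's longest-first loop
--     # with a per-candidate membership test and early return).
--     normalized = rel_path.strip("/")
--     if not normalized:
--         return False
--     candidates = set()
--     acc = None
--     for part in normalized.split("/"):
--         acc = part if acc is None else acc + "/" + part
--         candidates.add(acc)
--     return not candidates.isdisjoint(gitignored_paths)
-- ===== Notes on version B (the rewrite author's own statement) =====
-- stated objective: alternative
-- what changed: A scans prefixes longest-first with a per-candidate membership test and early return; B builds the set of all ancestor-prefix candidates in one forward pass (incremental string accumulation instead of repeated joins) and decides with a single set-disjointness test.
import Mathlib
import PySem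

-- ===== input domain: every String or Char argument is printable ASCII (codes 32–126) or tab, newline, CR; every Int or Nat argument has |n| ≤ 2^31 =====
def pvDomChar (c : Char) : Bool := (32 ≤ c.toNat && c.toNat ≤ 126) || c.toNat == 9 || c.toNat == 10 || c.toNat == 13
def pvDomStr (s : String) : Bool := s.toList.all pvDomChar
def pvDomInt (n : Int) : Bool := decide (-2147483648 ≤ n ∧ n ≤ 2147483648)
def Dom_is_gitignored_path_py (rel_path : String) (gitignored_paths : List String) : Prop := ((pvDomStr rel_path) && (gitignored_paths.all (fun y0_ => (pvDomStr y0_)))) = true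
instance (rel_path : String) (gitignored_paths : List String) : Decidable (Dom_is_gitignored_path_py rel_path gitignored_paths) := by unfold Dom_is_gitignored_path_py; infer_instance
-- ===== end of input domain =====

-- B replaces A's longest-first loop (membership test per prefix, early return) by one
-- forward pass collecting all prefix candidates into a set and a single disjointness test.

-- ===== PORT A =====
def is_gitignored_path_py (rel_path : String) (gitignored_paths : List String) : Bool :=
  let normalized := PySem.Str.stripChars rel_path "/"
  if normalized = "" then false
  else
    match PySem.Str.split? normalized "/" with
    | none => false  -- unreachable: the separator is the nonempty literal "/"
    | some parts =>
      (PySem.List.pyRange (parts.length : Int) 0 (-1)).any (fun idx =>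
        PySem.Set.contains gitignored_paths
          (PySem.Str.join "/" (PySem.List.slice parts none (some idx))))

-- ===== PORT B =====
def is_gitignored_path_py_alt (rel_path : String) (gitignored_paths : List String) : Bool :=
  let normalized := PySem.Str.stripChars rel_path "/"
  if normalized = "" then false
  else
    match PySem.Str.split? normalized "/" with
    | none => false  -- unreachable: the separator is the nonempty literal "/"
    | some parts =>
      let st := parts.foldl
        (fun (st : PySem.Set String × Option String) part =>
          let acc := match st.2 with
            | none => part
            | some a => a ++ "/" ++ part
          (PySem.Set.add st.1 acc, some acc))
        (PySem.Set.empty, none)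
      !(PySem.Set.isdisjoint st.1 gitignored_paths)

-- ===== PRECONDITION & SPEC =====
def Spec_is_gitignored_path_py (rel_path : String) (gitignored_paths : List String) (out : Bool) : Prop := out = is_gitignored_path_py_alt rel_path gitignored_paths
instance (rel_path : String) (gitignored_paths : List String) (out : Bool) : Decidable (Spec_is_gitignored_path_py rel_path gitignored_paths out) := by unfold Spec_is_gitignored_path_py; infer_instance

-- ===== CLAIM (what is proved, stated in full; the proofs are below) =====
def Claim_equal_is_gitignored_path_py : Prop := ∀ (rel_path : String) (gitignored_paths : List String), Dom_is_gitignored_path_py rel_path gitignored_paths → Spec_is_gitignored_path_py rel_path gitignored_paths (is_gitignored_path_py rel_path gitignored_paths)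

-- ===== LEMMAS AND PROOFS =====

-- "a ++ '/' ++ b" extends a "/"-join on the right (nonempty left list)
theorem pvJoin_append_singleton (pre : List String) (x : String) (h : pre ≠ []) :
    PySem.Str.join "/" (pre ++ [x]) = PySem.Str.join "/" pre ++ "/" ++ x := by
  induction pre with
  | nil => simp at h
  | cons p rest ih =>
    cases rest with
    | nil =>
      apply String.toList_inj.mp
      simp [PySem.Str.toList_join, PySem.Chars.join_cons_cons, PySem.Chars.join_singleton,
        String.toList_append]
    | cons q rest' =>
      apply String.toList_inj.mp
      have ih' := ih (by simp)
      have := congrArg String.toList ih'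
      simp [PySem.Str.toList_join, PySem.Chars.join_cons_cons, String.toList_append] at this ⊢
      simp [this]

-- B's folding step
def pvStep (st : PySem.Set String × Option String) (part : String) :
    PySem.Set String × Option String :=
  let acc := match st.2 with
    | none => part
    | some a => a ++ "/" ++ part
  (PySem.Set.add st.1 acc, some acc)

-- chained concatenation starting from a
def pvChain (a : String) (l : List String) : String :=
  l.foldl (fun u v => u ++ "/" ++ v) a

theorem pvChain_join (pre : List String) (l : List String) (h : pre ≠ []) :
    pvChain (PySem.Str.join "/" pre) l = PySem.Str.join "/" (pre ++ l) := by
  induction l generalizing pre with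
  | nil => simp [pvChain]
  | cons x xs ih =>
    have h1 : pvChain (PySem.Str.join "/" pre) (x :: xs)
        = pvChain (PySem.Str.join "/" pre ++ "/" ++ x) xs := rfl
    rw [h1, ← pvJoin_append_singleton pre x h, ih (pre ++ [x]) (by simp)]
    simp

-- invariant of B's fold: collected members, running accumulator
theorem pvFold_mem (l : List String) (s : PySem.Set String) (a : String) (y : String) :
    (y ∈ (l.foldl pvStep (s, some a)).1 ↔
      y ∈ s ∨ ∃ k : Nat, 1 ≤ k ∧ k ≤ l.length ∧ y = pvChain a (l.take k)) := by
  induction l generalizing s a with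
  | nil => simp
  | cons x xs ih =>
    have hstep : pvStep (s, some a) x = (PySem.Set.add s (a ++ "/" ++ x), some (a ++ "/" ++ x)) := rfl
    rw [List.foldl_cons, hstep, ih]
    constructor
    · rintro (hy | ⟨k, hk1, hk2, rfl⟩)
      · rw [PySem.Set.mem_add] at hy
        rcases hy with hy | rfl
        · exact Or.inl hy
        · exact Or.inr ⟨1, le_refl _, by simp, by simp [pvChain]⟩
      · exact Or.inr ⟨k + 1, by omega, by simp; omega, by simp [pvChain]⟩
    · rintro (hy | ⟨k, hk1, hk2, rfl⟩)
      · exact Or.inl (by rw [PySem.Set.mem_add]; exact Or.inl hy)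
      · match k, hk1 with
        | 1, _ =>
          refine Or.inl ?_
          rw [PySem.Set.mem_add]
          exact Or.inr (by simp [pvChain])
        | (k' + 2), _ =>
          refine Or.inr ⟨k' + 1, by omega, by simp at hk2 ⊢; omega, by simp [pvChain]⟩

-- the candidate set B builds = all "/"-joined prefixes of parts
theorem pvCandidates_mem (parts : List String) (y : String) :
    (y ∈ (parts.foldl pvStep (PySem.Set.empty, none)).1 ↔
      ∃ i : Nat, 1 ≤ i ∧ i ≤ parts.length ∧ y = PySem.Str.join "/" (parts.take i)) := by
  cases parts with
  | nil => simp [PySem.Set.empty]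
  | cons p rest =>
    have hstep : pvStep (PySem.Set.empty, none) p = (PySem.Set.add PySem.Set.empty p, some p) := rfl
    rw [List.foldl_cons, hstep, pvFold_mem]
    have hJp : PySem.Str.join "/" [p] = p := by
      apply String.toList_inj.mp
      simp [PySem.Str.toList_join, PySem.Chars.join_singleton]
    constructor
    · rintro (hy | ⟨k, hk1, hk2, rfl⟩)
      · rw [PySem.Set.mem_add] at hy
        rcases hy with hy | rfl
        · simp [PySem.Set.empty] at hy
        · exact ⟨1, le_refl _, by simp, by simp [hJp]⟩
      · refine ⟨k + 1, by omega, by simp; omega, ?_⟩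
        rw [← hJp, pvChain_join [p] (rest.take k) (by simp)]
        simp [hJp]
    · rintro ⟨i, hi1, hi2, rfl⟩
      match i, hi1 with
      | 1, _ =>
        refine Or.inl ?_
        rw [PySem.Set.mem_add]
        exact Or.inr (by simp [hJp])
      | (i' + 2), _ =>
        refine Or.inr ⟨i' + 1, by omega, by simp at hi2 ⊢; omega, ?_⟩
        rw [← hJp, pvChain_join [p] (rest.take (i' + 1)) (by simp)]
        simp [hJp]

-- A = true iff some "/"-joined prefix of parts is in the list
theorem pvA_iff (parts g : List String) :
    ((PySem.List.pyRange (parts.length : Int) 0 (-1)).any (fun idx =>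
        PySem.Set.contains g
          (PySem.Str.join "/" (PySem.List.slice parts none (some idx)))) = true ↔
      ∃ i : Nat, 1 ≤ i ∧ i ≤ parts.length ∧ PySem.Str.join "/" (parts.take i) ∈ g) := by
  rw [List.any_eq_true]
  constructor
  · rintro ⟨idx, hmem, hc⟩
    rw [PySem.List.mem_pyRange_neg_one] at hmem
    obtain ⟨h0, hn⟩ := hmem
    refine ⟨idx.toNat, by omega, by omega, ?_⟩
    rw [PySem.List.slice_to parts (by omega)] at hc
    exact (PySem.Set.contains_iff g _).mp hc
  · rintro ⟨i, hi1, hi2, hmem⟩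
    refine ⟨(i : Int), by rw [PySem.List.mem_pyRange_neg_one]; omega, ?_⟩
    rw [PySem.List.slice_to parts (by positivity)]
    simp only [Int.toNat_natCast]
    exact (PySem.Set.contains_iff g _).mpr hmem

-- B = true iff the candidate set meets the list
theorem pvB_iff (parts g : List String) :
    ((!(PySem.Set.isdisjoint (parts.foldl pvStep (PySem.Set.empty, none)).1 g)) = true ↔
      ∃ y ∈ (parts.foldl pvStep (PySem.Set.empty, none)).1, y ∈ g) := by
  rw [Bool.not_eq_true', ← Bool.not_eq_true, PySem.Set.isdisjoint_iff]
  push Not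
  rfl

-- A's loop and B's set meet on the same prefixes
theorem pvCore (parts g : List String) :
    ((PySem.List.pyRange (parts.length : Int) 0 (-1)).any (fun idx =>
        PySem.Set.contains g
          (PySem.Str.join "/" (PySem.List.slice parts none (some idx)))) =
      !(PySem.Set.isdisjoint (parts.foldl pvStep (PySem.Set.empty, none)).1 g)) := by
  rw [Bool.eq_iff_iff, pvA_iff, pvB_iff]
  constructor
  · rintro ⟨i, hi1, hi2, hmem⟩
    exact ⟨_, (pvCandidates_mem parts _).mpr ⟨i, hi1, hi2, rfl⟩, hmem⟩
  · rintro ⟨y, hy, hmem⟩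
    obtain ⟨i, hi1, hi2, rfl⟩ := (pvCandidates_mem parts y).mp hy
    exact ⟨i, hi1, hi2, hmem⟩

-- ===== VERDICT (by name: the statement is the Claim_ definition above) =====
theorem is_gitignored_path_py_spec : Claim_equal_is_gitignored_path_py := by
  intro rel_path gitignored_paths _
  unfold Spec_is_gitignored_path_py is_gitignored_path_py is_gitignored_path_py_alt
  dsimp only
  split_ifs with h
  · rfl
  · cases hsp : PySem.Str.split? (PySem.Str.stripChars rel_path "/") "/" with
    | none => rfl
    | some parts => exact pvCore parts gitignored_paths
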